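-- pv_equiv track=rewrite | github.com/pypi-data/pypi-mirror-27 | packages/arandomness/arandomness-0.2.0a1.tar.gz/arandomness-0.2.0a1/arandomness/string/max_substring.py | max_substring
-- ===== SOURCE A (Python) =====
-- def max_substring(words, position=0, _last_letter=''):
--     """Finds max substring shared by all strings starting at position
--
--     Args:
--
--         words (list): list of unicode of all words to compare
--
--         position (int): starting position in each word to begin analyzing
--                         for substring
--
--         _last_letter (unicode): last common letter, only for use
--                                 internally unless you really know what
--                                 you are doing
--
--     Returns:
--         unicode: max string common to all words
--
--     Examples:
--         .. code-block:: Python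
--
--             >>> max_substring(['aaaa', 'aaab', 'aaac'])
--             'aaa'
--             >>> max_substring(['abbb', 'bbbb', 'cbbb'], position=1)
--             'bbb'
--             >>> max_substring(['abc', 'bcd', 'cde'])
--             ''
--     """
--
--     # If end of word is reached, begin reconstructing the substring
--     try:
--         letter = [word[position] for word in words]
--     except IndexError:
--         return _last_letter
--
--     # Recurse if position matches, else begin reconstructing the substring
--     if all(l == letter[0] for l in letter) is True:
--         _last_letter += max_substring(words, position=position + 1,
--                                       _last_letter=letter[0])
--         return _last_letter
--     else:
--         return _last_letter
-- ===== SOURCE B (Python) =====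
-- def max_substring(words, position=0, _last_letter=''):
--     """Finds max substring shared by all strings starting at position.
--
--     Re-implementation: instead of materialising the list of letters at each
--     position, walk the first word as a reference and compare every other word
--     against it with an early exit on the first mismatch."""
--     first = words[0]
--     rest = words[1:]
--     chars = []
--     pos = position
--     while True:
--         try:
--             c = first[pos]
--             ok = True
--             for w in rest:
--                 if w[pos] != c:
--                     ok = False
--                     break
--         except IndexError:
--             break
--         if not ok:
--             break
--         chars.append(c)
--         pos += 1
--     return _last_letter + ''.join(chars)
-- ===== Notes on version B (the rewrite author's own statement) =====
-- stated objective: alternative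
-- what changed: Replaces A's recursion, which builds a per-position list of all words' letters and rebuilds the string by concatenation on the way back, with an iterative loop that walks the first word as a reference, compares the remaining words against it with an early exit on the first mismatch, and joins the collected characters once.
-- outside the precondition, e.g. on max_substring([], 0, ''): A raises IndexError, B raises IndexError
import Mathlib
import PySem

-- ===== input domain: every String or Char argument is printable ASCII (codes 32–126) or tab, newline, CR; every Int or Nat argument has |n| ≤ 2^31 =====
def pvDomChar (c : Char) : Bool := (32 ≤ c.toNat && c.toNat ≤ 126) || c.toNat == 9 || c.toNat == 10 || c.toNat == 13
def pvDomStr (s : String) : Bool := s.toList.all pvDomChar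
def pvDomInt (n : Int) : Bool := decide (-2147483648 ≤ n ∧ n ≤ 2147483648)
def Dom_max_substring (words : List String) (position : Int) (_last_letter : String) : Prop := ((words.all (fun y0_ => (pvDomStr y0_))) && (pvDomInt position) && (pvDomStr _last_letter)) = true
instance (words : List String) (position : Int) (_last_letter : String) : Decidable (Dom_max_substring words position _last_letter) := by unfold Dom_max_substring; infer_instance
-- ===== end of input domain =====

-- B drops A's recursion and its per-position letter list: it walks the first word as a
-- reference, compares the other words against it with an early exit, and joins the
-- collected characters once; objective: alternative decomposition.

-- ===== PORT A =====
-- Each recursive step of A requires word[position] to exist for the head word,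
-- so ((head).length - position) decreases; A's port cites this for termination.
theorem pvStep_lt (ws : List (List Char)) (position : Int) (l0 : Char) (rest : List Char)
    (h : ws.mapM (fun w => PySem.List.pyGet? w position) = some (l0 :: rest)) :
    ((ws.headD []).length - (position + 1)).toNat < ((ws.headD []).length - position).toNat := by
  cases ws with
  | nil => simp at h
  | cons w0 tl =>
    rw [List.mapM_cons] at h
    have h0 : ∃ c, PySem.List.pyGet? w0 position = some c := by
      cases hg : PySem.List.pyGet? w0 position <;> simp [hg] at h ⊢
    obtain ⟨c, hc⟩ := h0
    have hin : PySem.Raise.InRange w0.length position := by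
      by_contra hcn
      rw [← PySem.List.pyGet?_eq_none_iff (xs := w0) (i := position)] at hcn
      simp [hcn] at hc
    unfold PySem.Raise.InRange at hin
    simp only [List.headD_cons]
    omega

def maxSubGo (ws : List (List Char)) (position : Int) (ll : List Char) : List Char :=
  -- letter = [word[position] for word in words]  (none = IndexError → return _last_letter)
  match h : ws.mapM (fun w => PySem.List.pyGet? w position) with
  | none => ll
  | some [] => ll      -- Python raises IndexError at letter[0] here (words = []); excluded by Pre_
  | some (l0 :: rest) =>
      if (l0 :: rest).all (fun l => l == l0) then
        ll ++ maxSubGo ws (position + 1) [l0]     -- _last_letter += max_substring(…, letter[0])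
      else ll
termination_by ((ws.headD []).length - position).toNat
decreasing_by exact pvStep_lt ws position _ _ h

def max_substring (words : List String) (position : Int) (_last_letter : String) : String :=
  String.ofList (maxSubGo (words.map String.toList) position _last_letter.toList)

-- ===== PORT B =====
-- the inner `for w in rest:` of Source B: none = an IndexError escaping to the handler,
-- some false = a mismatch (ok = False; break), some true = every word agrees with c
def checkRest (rest : List (List Char)) (pos : Int) (c : Char) : Option Bool :=
  match rest with
  | [] => some true
  | w :: tl =>
    match PySem.List.pyGet? w pos with
    | none => none
    | some d => if d != c then some false else checkRest tl pos c

-- the `while True:` loop of Source B, accumulating `chars`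
def loopB (first : List Char) (rest : List (List Char)) (pos : Int) (chars : List Char) : List Char :=
  match h : PySem.List.pyGet? first pos with
  | none => chars                       -- IndexError on the reference word: break
  | some c =>
    match checkRest rest pos c with
    | none => chars                     -- IndexError on another word: break
    | some false => chars               -- mismatch: break
    | some true => loopB first rest (pos + 1) (chars ++ [c])
termination_by (first.length - pos).toNat
decreasing_by
  have hin : PySem.Raise.InRange first.length pos := by
    by_contra hcn
    rw [← PySem.List.pyGet?_eq_none_iff (xs := first) (i := pos)] at hcn
    simp [hcn] at h
  unfold PySem.Raise.InRange at hin; omega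

def max_substring_alt (words : List String) (position : Int) (_last_letter : String) : String :=
  match words.map String.toList with
  | [] => ""     -- unreachable under Pre_: Python raises IndexError at words[0] here
  | first :: rest => String.ofList (_last_letter.toList ++ loopB first rest position [])

-- ===== PRECONDITION & SPEC =====
-- Pre_ excludes only words = [], on which both A and B raise IndexError.
def Pre_max_substring (words : List String) (position : Int) (_last_letter : String) : Prop :=
  words ≠ []
instance (words : List String) (position : Int) (_last_letter : String) : Decidable (Pre_max_substring words position _last_letter) := by unfold Pre_max_substring; infer_instance
def pvWitness_max_substring : List String × Int × String := (["aaaa", "aaab", "aaac"], 0, "")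

def Spec_max_substring (words : List String) (position : Int) (_last_letter : String) (out : String) : Prop := out = max_substring_alt words position _last_letter
instance (words : List String) (position : Int) (_last_letter : String) (out : String) : Decidable (Spec_max_substring words position _last_letter out) := by unfold Spec_max_substring; infer_instance

-- ===== CLAIM (what is proved, stated in full; the proofs are below) =====
def Claim_equal_max_substring : Prop := ∀ (words : List String) (position : Int) (_last_letter : String), Dom_max_substring words position _last_letter → Pre_max_substring words position _last_letter → Spec_max_substring words position _last_letter (max_substring words position _last_letter)

-- ===== LEMMAS AND PROOFS =====

-- equation lemmas for loopB's four branches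
theorem loopB_n (first : List Char) (rest : List (List Char)) (pos : Int) (chars : List Char)
    (h : PySem.List.pyGet? first pos = none) : loopB first rest pos chars = chars := by
  rw [loopB.eq_def]; split <;> simp_all

theorem loopB_stop (first : List Char) (rest : List (List Char)) (pos : Int) (chars : List Char)
    (c : Char) (h : PySem.List.pyGet? first pos = some c)
    (hc : checkRest rest pos c ≠ some true) : loopB first rest pos chars = chars := by
  rw [loopB.eq_def]
  split
  · rfl
  · rename_i c' h'
    rw [h] at h'; cases h'
    cases hcv : checkRest rest pos c with
    | none => simp [hcv]
    | some b => cases b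
                · simp [hcv]
                · exact absurd hcv hc

theorem loopB_step (first : List Char) (rest : List (List Char)) (pos : Int) (chars : List Char)
    (c : Char) (h : PySem.List.pyGet? first pos = some c)
    (hc : checkRest rest pos c = some true) :
    loopB first rest pos chars = loopB first rest (pos + 1) (chars ++ [c]) := by
  rw [loopB.eq_def]
  split
  · simp_all
  · rename_i c' h'
    rw [h] at h'; cases h'
    simp [hc]

-- checkRest answers "every word of rest has letter c at pos"
theorem checkRest_true_iff (rest : List (List Char)) (pos : Int) (c : Char) :
    checkRest rest pos c = some true ↔ ∀ w ∈ rest, PySem.List.pyGet? w pos = some c := by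
  induction rest with
  | nil => simp [checkRest]
  | cons w tl ih =>
    simp only [checkRest, List.mem_cons]
    cases hg : PySem.List.pyGet? w pos with
    | none => simp [hg]
    | some d =>
      by_cases hd : d = c
      · subst hd; simpa [hg] using ih
      · simp [hg, hd]

-- if every word yields some c, mapM cannot be none
theorem mapM_ne_none (tl : List (List Char)) (pos : Int) (c : Char)
    (hall : ∀ w ∈ tl, PySem.List.pyGet? w pos = some c) :
    tl.mapM (fun w => PySem.List.pyGet? w pos) ≠ none := by
  induction tl with
  | nil => simp
  | cons w tws ih =>
    rw [List.mapM_cons, hall w List.mem_cons_self]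
    cases ht : tws.mapM (fun w => PySem.List.pyGet? w pos) with
    | none => exact absurd ht (ih (fun y hy => hall y (List.mem_cons_of_mem _ hy)))
    | some rs => simp

-- A's continue condition in terms of B's tests
theorem mapM_cons_all_iff (first : List Char) (tl : List (List Char)) (pos : Int) (l0 : Char) :
    ((∃ rest, (first :: tl).mapM (fun w => PySem.List.pyGet? w pos) = some (l0 :: rest) ∧
        (l0 :: rest).all (fun l => l == l0) = true)) ↔
    (PySem.List.pyGet? first pos = some l0 ∧ ∀ w ∈ tl, PySem.List.pyGet? w pos = some l0) := by
  constructor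
  · rintro ⟨rest, hm, hall⟩
    rw [List.mapM_cons] at hm
    cases hg : PySem.List.pyGet? first pos with
    | none => simp [hg] at hm
    | some c =>
      rw [hg] at hm
      cases ht : tl.mapM (fun w => PySem.List.pyGet? w pos) with
      | none => simp [ht] at hm
      | some rs =>
        rw [ht] at hm
        simp at hm
        obtain ⟨hc, hrs⟩ := hm
        subst hc; subst hrs
        refine ⟨rfl, ?_⟩
        simp only [List.all_cons, List.all_eq_true, beq_iff_eq, Bool.and_eq_true] at hall
        clear hg
        induction tl generalizing rs with
        | nil => simp
        | cons w tws ihw =>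
          rw [List.mapM_cons] at ht
          cases hw : PySem.List.pyGet? w pos with
          | none => simp [hw] at ht
          | some d =>
            rw [hw] at ht
            cases ht2 : tws.mapM (fun w => PySem.List.pyGet? w pos) with
            | none => simp [ht2] at ht
            | some rs2 =>
              rw [ht2] at ht
              have hts : rs = d :: rs2 := by simpa using ht.symm
              subst hts
              intro x hx
              rcases List.mem_cons.mp hx with h1 | h2
              · subst h1; rw [hw, hall.2 d List.mem_cons_self]
              · exact ihw rs2 ht2 ⟨trivial, fun y hy => hall.2 y (List.mem_cons_of_mem _ hy)⟩ x h2
  · rintro ⟨hf, hall⟩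
    have hx : ∃ rs, tl.mapM (fun w => PySem.List.pyGet? w pos) = some rs ∧ ∀ x ∈ rs, x = l0 := by
      induction tl with
      | nil => exact ⟨[], by simp⟩
      | cons w tws ihw =>
        obtain ⟨rs, hrs, hxs⟩ := ihw (fun y hy => hall y (List.mem_cons_of_mem _ hy))
        exact ⟨l0 :: rs, by
          rw [List.mapM_cons, hall w List.mem_cons_self, hrs]; rfl,
          by intro x hx2; rcases List.mem_cons.mp hx2 with h1 | h2; exact h1; exact hxs x h2⟩
    obtain ⟨rs, hrs, hxs⟩ := hx
    refine ⟨rs, ?_, ?_⟩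
    · rw [List.mapM_cons, hf, hrs]; rfl
    · simp only [List.all_cons, List.all_eq_true, beq_iff_eq, beq_self_eq_true, Bool.true_and]
      exact hxs

-- the loop's accumulator is only ever appended to
theorem loopB_acc (first : List Char) (rest : List (List Char)) (pos : Int) (b a : List Char) :
    loopB first rest pos (a ++ b) = a ++ loopB first rest pos b := by
  fun_induction loopB first rest pos b generalizing a with
  | case1 pos b h => rw [loopB_n _ _ _ _ h]
  | case2 pos b c h hc => rw [loopB_stop _ _ _ _ c h (by simp [hc])]
  | case3 pos b c h hc => rw [loopB_stop _ _ _ _ c h (by simp [hc])]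
  | case4 pos b c h hc ih =>
    rw [loopB_step _ _ _ _ c h hc, List.append_assoc]
    exact ih a

-- A's recursion = _last_letter followed by B's loop
theorem maxSubGo_eq (first : List Char) (tl : List (List Char)) (pos : Int) (ll : List Char) :
    maxSubGo (first :: tl) pos ll = ll ++ loopB first tl pos [] := by
  fun_induction maxSubGo (first :: tl) pos ll with
  | case1 pos ll h =>
    -- mapM = none: some word is out of range, so the loop stops too
    rw [List.mapM_cons] at h
    cases hg : PySem.List.pyGet? first pos with
    | none => rw [loopB_n _ _ _ _ hg]; simp
    | some c =>
      rw [hg] at h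
      cases ht : tl.mapM (fun w => PySem.List.pyGet? w pos) with
      | none =>
        have hnt : checkRest tl pos c ≠ some true := by
          intro hct
          exact mapM_ne_none tl pos c ((checkRest_true_iff tl pos c).mp hct) ht
        rw [loopB_stop _ _ _ _ c hg hnt]; simp
      | some rs => rw [ht] at h; simp at h
  | case2 pos ll h =>
    exfalso
    rw [List.mapM_cons] at h
    cases hg : PySem.List.pyGet? first pos with
    | none => rw [hg] at h; simp at h
    | some c =>
      rw [hg] at h
      cases ht : tl.mapM (fun w => PySem.List.pyGet? w pos) with
      | none => rw [ht] at h; simp at h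
      | some rs => rw [ht] at h; simp at h
  | case3 pos ll l0 rest h hall ih =>
    have hcond := (mapM_cons_all_iff first tl pos l0).mp ⟨rest, h, hall⟩
    rw [loopB_step _ _ _ _ l0 hcond.1 ((checkRest_true_iff tl pos l0).mpr hcond.2)]
    have hacc := loopB_acc first tl (pos + 1) [] [l0]
    simp only [List.append_nil] at hacc
    rw [ih, List.nil_append, hacc]
  | case4 pos ll l0 rest h hall =>
    cases hg : PySem.List.pyGet? first pos with
    | none =>
      exfalso; rw [List.mapM_cons, hg] at h; simp at h
    | some c =>
      have hcl0 : c = l0 := by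
        rw [List.mapM_cons, hg] at h
        cases ht : tl.mapM (fun w => PySem.List.pyGet? w pos) with
        | none => rw [ht] at h; simp at h
        | some rs => rw [ht] at h; simp at h; exact h.1
      subst hcl0
      have hnt : checkRest tl pos c ≠ some true := by
        intro hct
        apply hall
        obtain ⟨rest', hm', hall'⟩ :=
          (mapM_cons_all_iff first tl pos c).mpr ⟨hg, (checkRest_true_iff tl pos c).mp hct⟩
        rw [h] at hm'
        simp only [Option.some.injEq, List.cons.injEq] at hm'
        rw [hm'.2]
        exact hall'
      rw [loopB_stop _ _ _ _ c hg hnt]; simp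

-- ===== VERDICT (by name: the statement is the Claim_ definition above) =====
theorem max_substring_spec : Claim_equal_max_substring := by
  intro words position ll _ hpre
  unfold Spec_max_substring max_substring max_substring_alt
  cases words with
  | nil => exact absurd rfl hpre
  | cons w ws => simp only [List.map_cons]; rw [maxSubGo_eq]
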